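-- pv_equiv track=rewrite | github.com/orian3737/Password-brute_force | main.py | brute_force_plain
-- ===== SOURCE A (Python) =====
-- import itertools
-- import string
-- from typing import Optional
--
-- def brute_force_plain(target: str, min_length: int, max_length: int, digits: bool = False, symbols: bool = False) -> Optional[str]:
--     """
--     Brute-force plain text passwords with a flexible length range.
--     """
--     chars: str = string.ascii_lowercase
--
--     if digits:
--         chars += string.digits
--
--     if symbols:
--         chars += string.punctuation
--
--     attempts: int = 0
--     for length in range(min_length, max_length + 1):
--         for guess in itertools.product(chars, repeat=length):
--             attempts += 1
--             guess: str = ''.join(guess)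
--
--             if guess == target:
--                 return f'"{target}" was cracked in {attempts:,} guesses (length={length})'
-- ===== SOURCE B (Python) =====
-- import string
-- from typing import Optional
--
-- def brute_force_plain(target: str, min_length: int, max_length: int, digits: bool = False, symbols: bool = False) -> Optional[str]:
--     """Closed-form: the target's guess number is its mixed-radix rank over the charset."""
--     chars: str = string.ascii_lowercase
--     if digits:
--         chars += string.digits
--     if symbols:
--         chars += string.punctuation
--
--     length = len(target)
--     if not (min_length <= length <= max_length) or any(c not in chars for c in target):
--         return None
--
--     n = len(chars)
--     attempts = sum(n ** l for l in range(min_length, length))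
--     rank = 0
--     for c in target:
--         rank = rank * n + chars.index(c)
--     attempts += rank + 1
--     return f'"{target}" was cracked in {attempts:,} guesses (length={length})'
-- ===== Notes on version B (the rewrite author's own statement) =====
-- stated objective: alternative
-- what changed: B replaces A's enumeration of every candidate string with a closed-form computation: the guess count is the mixed-radix (base |chars|) rank of the target plus the sizes of all shorter length classes, computed directly from the target.
import Mathlib
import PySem

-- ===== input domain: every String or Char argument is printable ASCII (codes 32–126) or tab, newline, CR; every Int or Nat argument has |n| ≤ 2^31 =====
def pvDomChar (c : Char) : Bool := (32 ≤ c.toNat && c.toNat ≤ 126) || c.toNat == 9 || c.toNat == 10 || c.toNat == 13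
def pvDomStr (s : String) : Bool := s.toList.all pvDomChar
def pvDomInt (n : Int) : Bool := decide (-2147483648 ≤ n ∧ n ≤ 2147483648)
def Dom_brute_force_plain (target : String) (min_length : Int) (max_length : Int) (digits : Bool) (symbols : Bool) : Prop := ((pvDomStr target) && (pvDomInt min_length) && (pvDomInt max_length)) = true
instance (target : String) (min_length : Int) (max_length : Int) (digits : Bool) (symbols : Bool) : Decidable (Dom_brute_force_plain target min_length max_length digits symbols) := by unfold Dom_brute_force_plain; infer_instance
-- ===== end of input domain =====

-- B replaces A's enumeration of all candidate strings by the closed-form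
-- mixed-radix rank of the target over the charset (objective: alternative).

-- ===== PORT A =====
-- chars = ascii_lowercase (+ digits) (+ punctuation), in Python's append order
def pvCharsA (digits symbols : Bool) : List Char :=
  ("abcdefghijklmnopqrstuvwxyz".toList)
    ++ (if digits then "0123456789".toList else [])
    ++ (if symbols then "!\"#$%&'()*+,-./:;<=>?@[\\]^_`{|}~".toList else [])

-- itertools.product(chars, repeat=k) in Python's (lexicographic) order
def pvProd (cs : List Char) : Nat → List (List Char)
  | 0 => [[]]
  | k + 1 => cs.flatMap (fun c => (pvProd cs k).map (fun t => c :: t))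

-- f'{attempts:,}': decimal digits grouped in threes from the right (input/output reversed)
def pvGroup3 : List Char → List Char
  | d1 :: d2 :: d3 :: rest@(_ :: _) => d1 :: d2 :: d3 :: ',' :: pvGroup3 rest
  | l => l

def pvComma (n : Nat) : String := String.ofList (pvGroup3 (PySem.Int.toStr (n : Int)).toList.reverse).reverse

-- f'"{target}" was cracked in {attempts:,} guesses (length={length})'
def pvFmt (target : String) (attempts : Nat) (length : Int) : String :=
  "\"" ++ target ++ "\" was cracked in " ++ pvComma attempts ++ " guesses (length="
    ++ PySem.Int.toStr length ++ ")"

-- inner 'for guess in itertools.product(...)': attempts counter threaded, early exit on match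
def pvGuessLoop (t : List Char) : List (List Char) → Nat → Nat × Bool
  | [], a => (a, false)
  | g :: gs, a => if g = t then (a + 1, true) else pvGuessLoop t gs (a + 1)

-- outer 'for length in range(min_length, max_length + 1)'
def pvLenLoop (target : String) (cs : List Char) : List Int → Nat → Option String
  | [], _ => none
  | l :: rest, a =>
    let r := pvGuessLoop target.toList (pvProd cs l.toNat) a
    if r.2 then some (pvFmt target r.1 l) else pvLenLoop target cs rest r.1

def brute_force_plain (target : String) (min_length : Int) (max_length : Int) (digits : Bool) (symbols : Bool) : Option String :=
  pvLenLoop target (pvCharsA digits symbols) (PySem.List.pyRange min_length (max_length + 1) 1) 0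

-- ===== PORT B =====
def brute_force_plain_alt (target : String) (min_length : Int) (max_length : Int) (digits : Bool) (symbols : Bool) : Option String :=
  let chars := pvCharsA digits symbols
  let len : Int := (target.toList.length : Int)
  if min_length ≤ len ∧ len ≤ max_length ∧ target.toList.all (fun c => chars.contains c) then
    let n := chars.length
    let attempts := (PySem.List.pyRange min_length len 1).foldl (fun s l => s + n ^ l.toNat) 0
    let rank := target.toList.foldl (fun r c => r * n + (chars.idxOf? c).getD 0) 0
    some (pvFmt target (attempts + rank + 1) len)
  else none

-- ===== PRECONDITION & SPEC =====
-- Pre_ excludes min_length < 0 with min_length ≤ max_length: there Python A raises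
-- ValueError (itertools.product with a negative repeat); A returns on everything else.
def Pre_brute_force_plain (target : String) (min_length : Int) (max_length : Int) (digits : Bool) (symbols : Bool) : Prop :=
  0 ≤ min_length ∨ max_length < min_length
instance (target : String) (min_length : Int) (max_length : Int) (digits : Bool) (symbols : Bool) : Decidable (Pre_brute_force_plain target min_length max_length digits symbols) := by unfold Pre_brute_force_plain; infer_instance

def pvWitness_brute_force_plain : String × Int × Int × Bool × Bool := ("ab", 1, 2, false, false)

def Spec_brute_force_plain (target : String) (min_length : Int) (max_length : Int) (digits : Bool) (symbols : Bool) (out : Option String) : Prop := out = brute_force_plain_alt target min_length max_length digits symbols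
instance (target : String) (min_length : Int) (max_length : Int) (digits : Bool) (symbols : Bool) (out : Option String) : Decidable (Spec_brute_force_plain target min_length max_length digits symbols out) := by unfold Spec_brute_force_plain; infer_instance

-- ===== CLAIM (what is proved, stated in full; the proofs are below) =====
def Claim_equal_brute_force_plain : Prop := ∀ (target : String) (min_length : Int) (max_length : Int) (digits : Bool) (symbols : Bool), Dom_brute_force_plain target min_length max_length digits symbols → Pre_brute_force_plain target min_length max_length digits symbols → Spec_brute_force_plain target min_length max_length digits symbols (brute_force_plain target min_length max_length digits symbols)

-- ===== LEMMAS AND PROOFS =====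

-- rank of t in the lexicographic enumeration of all |t|-letter words over cs
def pvRank (cs : List Char) : List Char → Nat
  | [] => 0
  | c :: t => cs.idxOf c * cs.length ^ t.length + pvRank cs t

theorem pvProd_length (cs : List Char) (k : Nat) : (pvProd cs k).length = cs.length ^ k := by
  induction k with
  | zero => simp [pvProd]
  | succ k ih => simp [pvProd, List.length_flatMap, ih, pow_succ, Nat.mul_comm]

theorem pvProd_mem (cs : List Char) (k : Nat) (t : List Char) :
    t ∈ pvProd cs k ↔ t.length = k ∧ ∀ c ∈ t, c ∈ cs := by
  induction k generalizing t with
  | zero =>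
    simp [pvProd, List.length_eq_zero_iff]
    rintro rfl; simp
  | succ k ih =>
    simp only [pvProd, List.mem_flatMap, List.mem_map]
    constructor
    · rintro ⟨c, hc, t', ht', rfl⟩
      obtain ⟨hl, hall⟩ := (ih t').mp ht'
      refine ⟨by simp [hl], ?_⟩
      intro x hx
      rcases List.mem_cons.mp hx with rfl | hx
      · exact hc
      · exact hall _ hx
    · rintro ⟨hl, hall⟩
      cases t with
      | nil => simp at hl
      | cons c t' =>
        refine ⟨c, hall _ (by simp), t', (ih t').mpr ⟨by simpa using hl, ?_⟩, rfl⟩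
        intro x hx; exact hall _ (by simp [hx])

theorem idxOf_map_cons (t : List Char) (c : Char) (P : List (List Char)) :
    (P.map (c :: ·)).idxOf (c :: t) = P.idxOf t := by
  induction P with
  | nil => simp [List.idxOf]
  | cons p ps ih =>
    by_cases h : p = t
    · simp [h]
    · simp [h, ih]

theorem notMem_map_cons (t : List Char) (c x : Char) (hx : x ≠ c) (P : List (List Char)) :
    c :: t ∉ P.map (x :: ·) := by
  intro hmem
  obtain ⟨t', -, h⟩ := List.mem_map.mp hmem
  injection h with h1 h2
  exact hx h1

theorem idxOf_flatMap_cons (c : Char) (t : List Char) (P : List (List Char))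
    (ht : t ∈ P) : ∀ cs0 : List Char, c ∈ cs0 →
    (cs0.flatMap (fun c' => P.map (fun u => c' :: u))).idxOf (c :: t) =
      cs0.idxOf c * P.length + P.idxOf t := by
  intro cs0
  induction cs0 with
  | nil => simp
  | cons x xs ih =>
    intro hc
    by_cases hx : x = c
    · subst hx
      simp only [List.flatMap_cons, List.idxOf_cons_self]
      rw [List.idxOf_append_of_mem (by exact List.mem_map_of_mem ht),
        idxOf_map_cons]
      simp
    · have hc' : c ∈ xs := by
        rcases List.mem_cons.mp hc with rfl | h
        · exact absurd rfl hx
        · exact h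
      simp only [List.flatMap_cons]
      rw [List.idxOf_append_of_notMem (notMem_map_cons t c x hx P),
        ih hc', List.idxOf_cons_ne _ hx]
      simp only [List.length_map, Nat.succ_eq_add_one]
      ring

theorem idxOf_pvProd (cs : List Char) (t : List Char) (hall : ∀ c ∈ t, c ∈ cs) :
    (pvProd cs t.length).idxOf t = pvRank cs t := by
  induction t with
  | nil => simp [pvProd, pvRank, List.idxOf]
  | cons c t' ih =>
    have ht' : t' ∈ pvProd cs t'.length :=
      (pvProd_mem cs t'.length t').mpr ⟨rfl, fun x hx => hall _ (by simp [hx])⟩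
    show (pvProd cs (t'.length + 1)).idxOf (c :: t') = _
    rw [show pvProd cs (t'.length + 1)
        = cs.flatMap (fun c' => (pvProd cs t'.length).map (fun u => c' :: u)) from rfl]
    rw [idxOf_flatMap_cons c t' _ ht' cs (hall _ (by simp)),
      pvProd_length, ih (fun x hx => hall _ (by simp [hx])), pvRank]

theorem guessLoop_not_mem (t : List Char) (gs : List (List Char)) (a : Nat) (h : t ∉ gs) :
    pvGuessLoop t gs a = (a + gs.length, false) := by
  induction gs generalizing a with
  | nil => simp [pvGuessLoop]
  | cons g gs ih =>
    have hg : g ≠ t := fun he => h (by simp [he])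
    simp only [pvGuessLoop, if_neg hg]
    rw [ih _ (fun hm => h (by simp [hm]))]
    simp; omega

theorem guessLoop_mem (t : List Char) (gs : List (List Char)) (a : Nat) (h : t ∈ gs) :
    pvGuessLoop t gs a = (a + gs.idxOf t + 1, true) := by
  induction gs generalizing a with
  | nil => simp at h
  | cons g gs ih =>
    by_cases hg : g = t
    · simp [pvGuessLoop, hg]
    · have hm : t ∈ gs := by
        rcases List.mem_cons.mp h with h | h
        · exact absurd h.symm hg
        · exact h
      simp only [pvGuessLoop, if_neg hg, ih _ hm, List.idxOf_cons_ne _ hg]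
      simp only [Prod.mk.injEq]
      exact ⟨by omega, trivial⟩

theorem getD_idxOf? (cs : List Char) (c : Char) (h : c ∈ cs) :
    (cs.idxOf? c).getD 0 = cs.idxOf c := by
  obtain ⟨k, hk⟩ := Option.isSome_iff_exists.mp (List.isSome_idxOf?.mpr h)
  rw [List.idxOf_eq_getD_idxOf?, hk]; rfl

theorem foldl_rank (cs : List Char) (t : List Char) (hall : ∀ c ∈ t, c ∈ cs) :
    ∀ a : Nat, t.foldl (fun r c => r * cs.length + (cs.idxOf? c).getD 0) a
      = a * cs.length ^ t.length + pvRank cs t := by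
  induction t with
  | nil => intro a; simp [pvRank]
  | cons c t' ih =>
    intro a
    simp only [List.foldl_cons]
    rw [ih (fun x hx => hall _ (by simp [hx])) _, getD_idxOf? cs c (hall _ (by simp)), pvRank]
    simp [pow_succ]
    ring

-- the main loop characterisation: A's length loop, from any lower bound and counter
set_option maxHeartbeats 1000000 in
theorem lenLoop_eq (target : String) (cs : List Char) (hi : Int) :
    ∀ (k : Nat) (lo : Int) (a : Nat), 0 ≤ lo → (hi - lo).toNat ≤ k →
    pvLenLoop target cs (PySem.List.pyRange lo hi 1) a =
      (if lo ≤ (target.toList.length : Int) ∧ (target.toList.length : Int) < hi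
          ∧ (∀ c ∈ target.toList, c ∈ cs) then
        some (pvFmt target
          (a + (PySem.List.pyRange lo (target.toList.length : Int) 1).foldl
              (fun s l => s + cs.length ^ l.toNat) 0
            + pvRank cs target.toList + 1) (target.toList.length : Int))
      else none) := by
  intro k
  induction k with
  | zero =>
    intro lo a hlo hk
    rw [PySem.List.pyRange_one_eq_nil (by omega)]
    rw [if_neg (by rintro ⟨h1, h2, -⟩; omega)]
    rfl
  | succ k ih =>
    intro lo a hlo hk
    by_cases hlt : lo < hi
    · rw [PySem.List.pyRange_one_cons hlt]
      simp only [pvLenLoop]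
      by_cases hL : lo = (target.toList.length : Int)
      · by_cases hall : ∀ c ∈ target.toList, c ∈ cs
        · have hmem : target.toList ∈ pvProd cs lo.toNat :=
            (pvProd_mem cs lo.toNat target.toList).mpr ⟨by omega, hall⟩
          rw [guessLoop_mem _ _ _ hmem]
          have hto : lo.toNat = target.toList.length := by omega
          rw [if_pos rfl, if_pos ⟨by omega, by omega, hall⟩]
          rw [PySem.List.pyRange_one_eq_nil (by omega)]
          have : (pvProd cs lo.toNat).idxOf target.toList = pvRank cs target.toList := by
            rw [hto]; exact idxOf_pvProd cs target.toList hall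
          rw [this]
          rw [hL]
          rfl
        · have hnm : target.toList ∉ pvProd cs lo.toNat := fun hm =>
            hall ((pvProd_mem cs lo.toNat target.toList).mp hm).2
          rw [guessLoop_not_mem _ _ _ hnm, pvProd_length]
          rw [if_neg (by simp), ih (lo + 1) _ (by omega) (by omega)]
          rw [if_neg (by rintro ⟨-, -, h⟩; exact hall h),
            if_neg (by rintro ⟨-, -, h⟩; exact hall h)]
      · have hnm : target.toList ∉ pvProd cs lo.toNat := fun hm => by
          have := ((pvProd_mem cs lo.toNat target.toList).mp hm).1
          omega
        rw [guessLoop_not_mem _ _ _ hnm, pvProd_length]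
        rw [if_neg (by simp), ih (lo + 1) _ (by omega) (by omega)]
        by_cases hcond : lo + 1 ≤ (target.toList.length : Int)
            ∧ (target.toList.length : Int) < hi ∧ (∀ c ∈ target.toList, c ∈ cs)
        · rw [if_pos hcond, if_pos ⟨by omega, hcond.2.1, hcond.2.2⟩]
          have hS : (PySem.List.pyRange lo (target.toList.length : Int) 1).foldl
                (fun s l => s + cs.length ^ l.toNat) 0
              = cs.length ^ lo.toNat + (PySem.List.pyRange (lo + 1) (target.toList.length : Int) 1).foldl
                (fun s l => s + cs.length ^ l.toNat) 0 := by
            rw [PySem.List.pyRange_one_cons (by omega)]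
            simp only [List.foldl_cons]
            rw [PySem.List.foldl_add_nat, PySem.List.foldl_add_nat]
            omega
          rw [hS]
          apply congrArg (fun n : Nat => some (pvFmt target n (target.toList.length : Int)))
          omega
        · rw [if_neg hcond, if_neg (by rintro ⟨h1, h2, h3⟩; exact hcond ⟨by omega, h2, h3⟩)]
    · rw [PySem.List.pyRange_one_eq_nil (by omega)]
      rw [if_neg (by rintro ⟨h1, h2, -⟩; omega)]
      rfl

-- ===== VERDICT (by name: the statement is the Claim_ definition above) =====
set_option maxHeartbeats 1000000 in
theorem brute_force_plain_spec : Claim_equal_brute_force_plain := by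
  intro target mn mx d s _ hpre
  unfold Spec_brute_force_plain brute_force_plain brute_force_plain_alt
  rcases hpre with hpre | hpre
  · rw [lenLoop_eq target (pvCharsA d s) (mx + 1) (mx + 1 - mn).toNat mn 0 hpre le_rfl]
    by_cases hcond : mn ≤ (target.toList.length : Int)
        ∧ (target.toList.length : Int) < mx + 1 ∧ (∀ c ∈ target.toList, c ∈ pvCharsA d s)
    · rw [if_pos hcond]
      have hall : ∀ c ∈ target.toList, c ∈ pvCharsA d s := hcond.2.2
      rw [if_pos ⟨hcond.1, by omega, by
        simp only [List.all_eq_true, List.contains_iff_mem]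
        intro c hc; simpa using hall c hc⟩]
      simp only []
      rw [foldl_rank (pvCharsA d s) target.toList hall 0]
      apply congrArg (fun n : Nat => some (pvFmt target n (target.toList.length : Int)))
      omega
    · rw [if_neg hcond, if_neg (by
        rintro ⟨h1, h2, h3⟩
        refine hcond ⟨h1, by omega, ?_⟩
        intro c hc
        have := (List.all_eq_true.mp h3) c hc
        simpa [List.contains_iff_mem] using this)]
  · rw [PySem.List.pyRange_one_eq_nil (by omega)]
    rw [if_neg (by rintro ⟨h1, h2, -⟩; omega)]
    rfl
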